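-- pv_equiv track=rewrite | github.com/shiquanyang/unilm | s2s-ft/multimodalKB/utils/mturk_log_parser.py | check_short_conversation
-- ===== SOURCE A (Python) =====
-- def check_short_conversation(data):
--     cnt = 0
--     is_short_turn = 0
--     turn_cnt = 0
--     for element in data:
--         turn_cnt += 1
--         element_list = element.strip().split(' ')
--         if len(element_list) <= 3:
--             is_short_turn += 1
--         if turn_cnt == 2 and is_short_turn == 2:
--             cnt += 1
--         if turn_cnt == 2:
--             turn_cnt = 0
--             is_short_turn = 0
--     if cnt > 1:
--         return True
--     else:
--         return False
-- ===== SOURCE B (Python) =====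
-- def check_short_conversation(data):
--     def short(x):
--         return len(x.strip().split(' ')) <= 3
--
--     def skip_past_short_pair(it):
--         # Consume items from the iterator in pairs until a pair with both
--         # turns short is found (True) or the iterator runs out (False).
--         for a in it:
--             b = next(it, None)
--             if b is None:
--                 return False
--             if short(a) and short(b):
--                 return True
--         return False
--
--     it = iter(data)
--     # True iff the stream contains at least two disjoint all-short pairs:
--     # find the first one, then search the remaining stream for another.
--     return skip_past_short_pair(it) and skip_past_short_pair(it)
-- ===== Notes on version B (the rewrite author's own statement) =====
-- stated objective: alternative
-- what changed: Replaces A's counting state machine (turn/short counters reset every two turns, final count compared to 1) with two staged short-circuit searches over a shared iterator: find the first all-short pair, then search the remaining stream for a second; no counters are kept and the scan stops as soon as the second pair is found.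
import Mathlib
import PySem

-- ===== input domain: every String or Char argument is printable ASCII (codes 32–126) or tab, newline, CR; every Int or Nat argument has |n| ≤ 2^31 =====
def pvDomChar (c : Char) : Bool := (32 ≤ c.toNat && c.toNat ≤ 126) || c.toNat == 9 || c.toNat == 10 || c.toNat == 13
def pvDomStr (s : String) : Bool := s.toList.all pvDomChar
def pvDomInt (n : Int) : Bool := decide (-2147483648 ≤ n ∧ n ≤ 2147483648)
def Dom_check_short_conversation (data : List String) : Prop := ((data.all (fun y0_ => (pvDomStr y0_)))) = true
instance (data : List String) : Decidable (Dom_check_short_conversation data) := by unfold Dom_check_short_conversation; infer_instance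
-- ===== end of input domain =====

-- B replaces A's counting state machine with two staged short-circuit searches on a
-- shared iterator (find the first all-short pair, then a second); objective: alternative.

-- ===== PORT A =====
-- step of A's for-loop over state (cnt, is_short_turn, turn_cnt)
def csc_stepA (st : Int × Int × Int) (element : String) : Int × Int × Int :=
  let cnt := st.1
  let is_short := st.2.1
  let turn_cnt := st.2.2 + 1
  -- element.strip().split(' '): sep " " ≠ "" so split? is always some; getD only totalizes
  let element_list := (PySem.Str.split? (PySem.Str.strip element) " ").getD []
  let is_short := if element_list.length ≤ 3 then is_short + 1 else is_short
  let cnt := if turn_cnt = 2 ∧ is_short = 2 then cnt + 1 else cnt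
  if turn_cnt = 2 then (cnt, 0, 0) else (cnt, is_short, turn_cnt)

def check_short_conversation (data : List String) : Bool :=
  let st := data.foldl csc_stepA (0, 0, 0)
  decide (st.1 > 1)

-- ===== PORT B =====
def csc_short (x : String) : Bool :=
  -- x.strip().split(' '): sep " " ≠ "" so split? is always some; getD only totalizes
  decide (((PySem.Str.split? (PySem.Str.strip x) " ").getD []).length ≤ 3)

-- skip_past_short_pair: consumes the iterator in pairs until a pair with both turns
-- short appears; returns whether it found one, together with the unconsumed rest of
-- the iterator (in Python the shared iterator object carries the rest implicitly)
def csc_skip : List String → Bool × List String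
  | [] => (false, [])
  | [_] => (false, [])            -- b is None → return False (iterator exhausted)
  | x :: y :: r => if csc_short x && csc_short y then (true, r) else csc_skip r

def check_short_conversation_alt (data : List String) : Bool :=
  let s1 := csc_skip data
  s1.1 && (csc_skip s1.2).1

-- ===== PRECONDITION & SPEC =====
def Spec_check_short_conversation (data : List String) (out : Bool) : Prop := out = check_short_conversation_alt data
instance (data : List String) (out : Bool) : Decidable (Spec_check_short_conversation data out) := by unfold Spec_check_short_conversation; infer_instance

-- ===== CLAIM (what is proved, stated in full; the proofs are below) =====
def Claim_equal_check_short_conversation : Prop := ∀ (data : List String), Dom_check_short_conversation data → Spec_check_short_conversation data (check_short_conversation data)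

-- ===== LEMMAS AND PROOFS =====

-- the consecutive non-overlapping pairs of xs
def csc_pairs : List String → List (String × String)
  | [] => []
  | [_] => []
  | x :: y :: r => (x, y) :: csc_pairs r

-- count of pairs where both elements are short
def csc_nPairs (xs : List String) : Nat :=
  (csc_pairs xs).countP (fun p => csc_short p.1 && csc_short p.2)

-- A's loop invariant: at the start of a fresh two-turn block with accumulated cnt = c,
-- the final cnt is c plus the number of remaining all-short pairs
lemma csc_foldA (xs : List String) (c : Int) :
    (xs.foldl csc_stepA (c, 0, 0)).1 = c + (csc_nPairs xs : Int) := by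
  induction xs using csc_pairs.induct generalizing c with
  | case1 => simp [csc_nPairs, csc_pairs]
  | case2 x =>
      simp only [List.foldl_cons, List.foldl_nil]
      have h : (csc_stepA (c, 0, 0) x).1 = c := by
        by_cases hx : ((PySem.Str.split? (PySem.Str.strip x) " ").getD []).length ≤ 3 <;>
          simp [csc_stepA, hx]
      rw [h]
      simp [csc_nPairs, csc_pairs]
  | case3 x y r ih =>
      simp only [List.foldl_cons]
      by_cases hx : ((PySem.Str.split? (PySem.Str.strip x) " ").getD []).length ≤ 3 <;>
      by_cases hy : ((PySem.Str.split? (PySem.Str.strip y) " ").getD []).length ≤ 3 <;>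
      · rw [show csc_stepA (csc_stepA (c, 0, 0) x) y
              = (c + (if csc_short x && csc_short y then 1 else 0), 0, 0) by
            simp [csc_stepA, csc_short, hx, hy]]
        rw [ih]
        simp only [csc_nPairs, csc_pairs, List.countP_cons, csc_short, hx, hy]
        simp
        try omega

-- B's search invariant: the pair count is 0 when the search fails, and one more than
-- the pair count of the unconsumed rest when it succeeds
lemma csc_skip_count (xs : List String) :
    csc_nPairs xs = if (csc_skip xs).1 then csc_nPairs (csc_skip xs).2 + 1 else 0 := by
  induction xs using csc_pairs.induct with
  | case1 => simp [csc_skip, csc_nPairs, csc_pairs]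
  | case2 x => simp [csc_skip, csc_nPairs, csc_pairs]
  | case3 x y r ih =>
      by_cases h : csc_short x && csc_short y
      · simp [csc_skip, h, csc_nPairs, csc_pairs]
      · simp only [csc_skip, h, csc_nPairs, csc_pairs, List.countP_cons]
        simpa [csc_nPairs, h] using ih

-- ===== VERDICT (by name: the statement is the Claim_ definition above) =====
theorem check_short_conversation_spec : Claim_equal_check_short_conversation := by
  intro data _
  unfold Spec_check_short_conversation check_short_conversation check_short_conversation_alt
  simp only []
  rw [csc_foldA]
  have h1 := csc_skip_count data
  have h2 := csc_skip_count (csc_skip data).2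
  cases hf : (csc_skip data).1 <;> rw [hf] at h1 <;> simp at h1
  · simp [h1]
  · rw [h1]
    cases hg : (csc_skip (csc_skip data).2).1 <;> rw [hg] at h2 <;> simp at h2 <;>
      simp [h2]
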